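-- pv_equiv track=rewrite | github.com/LD1016/Data-Structures-and-Algorithms | Coding_Challenge/Microsoft_Problems/microsoftFlipBits.py | helper
-- ===== SOURCE A (Python) =====
-- def helper(A, zeroOrOne):
--     count = 0
--     for i in range(len(A)):
--         if i % 2 == 0 and A[i] != zeroOrOne:
--             count += 1
--         elif i % 2 != 0 and A[i] == zeroOrOne:
--             count += 1
--     return count
-- ===== SOURCE B (Python) =====
-- def helper(A, zeroOrOne):
--     count = 0
--     k = 0
--     n = len(A)
--     while k + 1 < n:
--         if A[k] != zeroOrOne:
--             count += 1
--         if A[k + 1] == zeroOrOne: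
--             count += 1
--         k += 2
--     if k < n and A[k] != zeroOrOne:
--         count += 1
--     return count
-- ===== Notes on version B (the rewrite author's own statement) =====
-- stated objective: alternative
-- what changed: Replaces the index+modulo parity test of A by a stride-2 loop that handles one even/odd pair per iteration (plus a single trailing element), so no parity test remains.
import Mathlib
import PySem

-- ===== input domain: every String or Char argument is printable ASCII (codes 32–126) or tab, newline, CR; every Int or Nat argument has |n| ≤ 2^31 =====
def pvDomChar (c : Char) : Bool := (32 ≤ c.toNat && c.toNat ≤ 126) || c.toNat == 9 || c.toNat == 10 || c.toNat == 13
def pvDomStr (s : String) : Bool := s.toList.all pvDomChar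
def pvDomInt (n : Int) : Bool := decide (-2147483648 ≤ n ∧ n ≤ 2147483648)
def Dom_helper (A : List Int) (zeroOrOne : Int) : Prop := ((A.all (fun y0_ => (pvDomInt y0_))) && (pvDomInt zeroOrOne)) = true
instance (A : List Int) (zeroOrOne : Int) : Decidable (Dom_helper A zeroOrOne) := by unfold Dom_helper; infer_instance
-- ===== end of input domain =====

-- B replaces A's index/modulo loop by a two-at-a-time structural recursion (objective: alternative).

-- ===== PORT A =====
-- for i in range(len(A)): if i % 2 == 0 and A[i] != z: count += 1 elif i % 2 != 0 and A[i] == z: count += 1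
def helper (A : List Int) (zeroOrOne : Int) : Int :=
  (PySem.List.pyRange 0 (A.length) 1).foldl
    (fun count i =>
      if PySem.Int.mod i 2 = 0 ∧ PySem.List.pyGetD A i 0 ≠ zeroOrOne then count + 1
      else if PySem.Int.mod i 2 ≠ 0 ∧ PySem.List.pyGetD A i 0 = zeroOrOne then count + 1
      else count)
    0

-- ===== PORT B =====
-- while k + 1 < n: count the even-position element (!= z) and the odd one (== z), k += 2; then the trailing element
def helperAltGo (zeroOrOne : Int) (A : List Int) (k : Nat) (count : Int) : Int :=
  if h : k + 1 < A.length then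
    let c1 := if PySem.List.pyGetD A (k : Int) 0 ≠ zeroOrOne then count + 1 else count
    let c2 := if PySem.List.pyGetD A ((k : Int) + 1) 0 = zeroOrOne then c1 + 1 else c1
    helperAltGo zeroOrOne A (k + 2) c2
  else
    if k < A.length ∧ PySem.List.pyGetD A (k : Int) 0 ≠ zeroOrOne then count + 1 else count
termination_by A.length - k

def helper_alt (A : List Int) (zeroOrOne : Int) : Int := helperAltGo zeroOrOne A 0 0

-- ===== PRECONDITION & SPEC =====
def Spec_helper (A : List Int) (zeroOrOne : Int) (out : Int) : Prop := out = helper_alt A zeroOrOne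
instance (A : List Int) (zeroOrOne : Int) (out : Int) : Decidable (Spec_helper A zeroOrOne out) := by unfold Spec_helper; infer_instance

-- ===== CLAIM (what is proved, stated in full; the proofs are below) =====
def Claim_equal_helper : Prop := ∀ (A : List Int) (zeroOrOne : Int), Dom_helper A zeroOrOne → Spec_helper A zeroOrOne (helper A zeroOrOne)

-- ===== LEMMAS AND PROOFS =====

-- one-at-a-time count with an explicit parity flag, the midpoint between the two programs
def goPar (zeroOrOne : Int) : Bool → List Int → Int
  | _, [] => 0
  | e, a :: r =>
      (if e then (if a = zeroOrOne then 0 else 1) else (if a = zeroOrOne then 1 else 0))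
        + goPar zeroOrOne (!e) r

lemma getD_mid (pre tail : List Int) (x : Int) :
    PySem.List.pyGetD (pre ++ x :: tail) (pre.length : Int) 0 = x := by
  rw [PySem.List.pyGetD_natCast]
  simp [List.getD]

lemma alt_loop (z : Int) : ∀ (n : Nat) (rest pre : List Int) (c : Int), rest.length = n →
    helperAltGo z (pre ++ rest) pre.length c = c + goPar z true rest := by
  intro n
  induction n using Nat.strong_induction_on with
  | _ n ih =>
    intro rest pre c hlen
    match rest with
    | [] =>
        rw [helperAltGo]
        simp [goPar]
    | [a] =>
        rw [helperAltGo]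
        have h1 : ¬ (pre.length + 1 < (pre ++ [a]).length) := by simp
        have h2 : pre.length < (pre ++ [a]).length := by simp
        simp only [h1, dif_neg, not_false_iff]
        rw [getD_mid]
        by_cases ha : a = z
        · simp [h2, ha, goPar]
        · simp [h2, ha, goPar]
    | a :: b :: r =>
        rw [helperAltGo]
        have h1 : pre.length + 1 < (pre ++ a :: b :: r).length := by simp only [List.length_append, List.length_cons]; omega
        simp only [h1, dif_pos]
        have hb : PySem.List.pyGetD (pre ++ a :: b :: r) ((pre.length : Int) + 1) 0 = b := by
          have : pre ++ a :: b :: r = (pre ++ [a]) ++ b :: r := by simp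
          rw [this, show ((pre.length : Int) + 1) = (((pre ++ [a]).length : Nat) : Int) by
            push_cast [List.length_append, List.length_cons, List.length_nil]; ring]
          exact getD_mid (pre ++ [a]) r b
        rw [getD_mid, hb]
        have happ : pre ++ a :: b :: r = (pre ++ [a, b]) ++ r := by simp
        have hk : pre.length + 2 = (pre ++ [a, b]).length := by simp
        have hr : r.length < n := by simp at hlen; omega
        rw [happ, hk, ih r.length hr r (pre ++ [a, b]) _ rfl]
        by_cases ha : a = z <;> by_cases hb2 : b = z <;> simp [ha, hb2, goPar] <;> ring

lemma loop_eq (z : Int) (rest : List Int) : ∀ (pre : List Int) (c : Int),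
    (PySem.List.pyRange (pre.length) ((pre.length + rest.length : Nat)) 1).foldl
      (fun count i =>
        if PySem.Int.mod i 2 = 0 ∧ PySem.List.pyGetD (pre ++ rest) i 0 ≠ z then count + 1
        else if PySem.Int.mod i 2 ≠ 0 ∧ PySem.List.pyGetD (pre ++ rest) i 0 = z then count + 1
        else count)
      c
    = c + goPar z (decide (pre.length % 2 = 0)) rest := by
  induction rest with
  | nil =>
      intro pre c
      rw [PySem.List.pyRange_one_eq_nil (by simp)]
      simp [goPar]
  | cons a r ih =>
      intro pre c
      rw [PySem.List.pyRange_one_cons (by push_cast [List.length_cons]; omega)]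
      rw [List.foldl_cons]
      have happ : pre ++ a :: r = (pre ++ [a]) ++ r := by simp
      rw [happ]
      have hget : PySem.List.pyGetD ((pre ++ [a]) ++ r) (pre.length : Int) 0 = a := by
        rw [PySem.List.pyGetD_natCast]
        simp [List.getD]
      have hmod : PySem.Int.mod (pre.length : Int) 2 = ((pre.length % 2 : Nat) : Int) :=
        PySem.Int.mod_natCast pre.length 2
      have hcast : ((pre.length : Int) + 1) = (((pre ++ [a]).length : Nat) : Int) := by
        push_cast [List.length_append, List.length_cons, List.length_nil]; ring
      have hcast2 : ((pre.length + (a :: r).length : Nat) : Int)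
          = (((pre ++ [a]).length + r.length : Nat) : Int) := by
        push_cast [List.length_append, List.length_cons, List.length_nil]; ring
      rw [hcast, hcast2, ih ((pre ++ [a])), hget, hmod]
      simp only [List.length_append, List.length_cons, List.length_nil, Nat.zero_add]
      by_cases hpar : pre.length % 2 = 0
      · have hs : (pre.length + 1) % 2 = 1 := by omega
        by_cases ha : a = z <;> simp [hpar, hs, ha, goPar] <;> ring
      · have hp1 : pre.length % 2 = 1 := by omega
        have hs : (pre.length + 1) % 2 = 0 := by omega
        by_cases ha : a = z <;> simp [hp1, hs, ha, goPar] <;> ring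

-- ===== VERDICT (by name: the statement is the Claim_ definition above) =====
theorem helper_spec : Claim_equal_helper := by
  intro A z _
  unfold Spec_helper helper helper_alt
  have h := loop_eq z A [] 0
  simp only [List.length_nil, List.nil_append, Nat.zero_add, Nat.cast_zero] at h
  have h2 := alt_loop z A.length A [] 0 rfl
  simp only [List.length_nil, List.nil_append] at h2
  rw [h2]
  simpa using h
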